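-- pv_equiv track=rewrite | github.com/Haaffiiizzz/Leetcode_Problems | Lexicographically Smallest Negated Permutation that Sums to Target.py | constructPermutation
-- ===== SOURCE A (Python) =====
-- from typing import List
--
-- def constructPermutation(n: int, target: int) -> List[int]:
--     """
--     Return lexicographically smallest length-n array whose absolute values are
--     1..n and whose sum equals target. If impossible, return [].
--     """
--     total = n * (n + 1) // 2
--     if abs(target) > total or ((total - target) & 1):
--         return []
--
--
--     from functools import lru_cache
--
--     @lru_cache(None)
--     def can(mask: int, rem: int) -> bool:
--         """Feasibility of reaching 'rem' using unused numbers in mask."""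
--         if mask == 0:
--             return rem == 0
--         # Quick bound pruning
--         max_abs = 0
--         tmp = mask
--         bit = 1
--         while tmp:
--             if tmp & 1:
--                 max_abs += bit
--             tmp >>= 1
--             bit += 1
--         if rem < -max_abs or rem > max_abs:
--             return False
--
--         # Try each available number with both signs
--         for a in range(1, n + 1):
--             bitmask = 1 << (a - 1)
--             if not (mask & bitmask):
--                 continue
--             next_mask = mask ^ bitmask
--             if can(next_mask, rem - a) or can(next_mask, rem + a):
--                 return True
--         return False
--
--     mask_all = (1 << n) - 1
--     result = []
--     rem = target
--
--     while mask_all: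
--         chosen = None
--         # Order candidates by signed value: negative large to small, then positive small to large
--         for sign in (-1, 1):
--             if sign == -1:
--                 abs_iter = range(n, 0, -1)
--             else:
--                 abs_iter = range(1, n + 1)
--             for a in abs_iter:
--                 bitmask = 1 << (a - 1)
--                 if not (mask_all & bitmask):
--                     continue
--                 val = sign * a
--                 next_mask = mask_all ^ bitmask
--                 if can(next_mask, rem - val):
--                     chosen = (val, next_mask)
--                     break
--             if chosen:
--                 break
--
--         if chosen is None:
--             return []
--
--         val, mask_all = chosen
--         result.append(val)
--         rem -= val
--
--     return result
-- ===== SOURCE B (Python) =====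
-- from typing import List
--
-- def constructPermutation(n: int, target: int) -> List[int]:
--     total = n * (n + 1) // 2
--     if abs(target) > total or ((total - target) & 1):
--         return []
--     remaining = list(range(1, n + 1))
--     result = []
--     rem = target
--     while remaining:
--         for val in [-a for a in reversed(remaining)] + remaining:
--             a = abs(val)
--             rest = [x for x in remaining if x != a]
--             if _feasible(rest, rem - val):
--                 result.append(val)
--                 remaining = rest
--                 rem -= val
--                 break
--         else:
--             return []
--     return result
--
-- def _feasible(vals, r):
--     """Exact +/- reachability: subset-sum bitset over vals."""
--     s = sum(vals)
--     if abs(r) > s or ((s - r) & 1):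
--         return False
--     need = (s - r) // 2
--     bits = 1
--     for a in vals:
--         bits |= bits << a
--     return (bits >> need) & 1 == 1
-- ===== Notes on version B (the rewrite author's own statement) =====
-- stated objective: alternative
-- what changed: Replaced the memoized exponential two-sign recursion 'can' over bitmasks by an exact per-step subset-sum feasibility test computed with an iterative big-int bitset DP over the remaining values, keeping the same greedy candidate order.
import Mathlib
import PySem

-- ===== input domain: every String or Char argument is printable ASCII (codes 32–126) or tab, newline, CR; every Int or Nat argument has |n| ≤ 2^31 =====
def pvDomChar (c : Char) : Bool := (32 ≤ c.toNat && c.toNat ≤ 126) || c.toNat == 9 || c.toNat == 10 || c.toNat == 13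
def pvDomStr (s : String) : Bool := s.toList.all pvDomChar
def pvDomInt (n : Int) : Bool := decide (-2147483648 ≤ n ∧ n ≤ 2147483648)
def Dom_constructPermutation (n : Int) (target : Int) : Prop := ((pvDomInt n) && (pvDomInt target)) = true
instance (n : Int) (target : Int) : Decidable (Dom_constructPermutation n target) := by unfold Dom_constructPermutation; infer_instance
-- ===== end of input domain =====

-- B replaces A's memoized exponential two-sign recursion by an exact subset-sum bitset
-- feasibility test per greedy step (same greedy order, same results); proved equal on Pre_.

-- ===== PORT A =====
-- the 'while tmp:' loop of can(): max_abs accumulation (bit shifts right each turn)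
def pvMaxAbs (tmp bit acc : Nat) : Nat :=
  if h : tmp = 0 then acc
  else pvMaxAbs (tmp >>> 1) (bit + 1) (acc + (if tmp &&& 1 = 1 then bit else 0))
  termination_by tmp
  decreasing_by
    simp only [Nat.shiftRight_one]
    exact Nat.div_lt_self (Nat.pos_of_ne_zero h) (by norm_num)

-- can(mask, rem): the lru_cache memoisation only affects speed, not the value; ported as plain
-- recursion with a fuel guard (fuel ≥ popcount mask on every call the program makes).
def pvCan (n : Nat) : Nat → Nat → Int → Bool
  | fuel, mask, rem =>
    if mask = 0 then rem == 0
    else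
      let maxAbs := pvMaxAbs mask 1 0
      if rem < -(maxAbs : Int) ∨ rem > (maxAbs : Int) then false
      else
        match fuel with
        | 0 => false  -- fuel guard, never reached by the program's calls
        | fuel + 1 =>
          (List.range' 1 n).any fun a =>
            let bm := 1 <<< (a - 1)
            if mask &&& bm = 0 then false
            else pvCan n fuel (mask ^^^ bm) (rem - (a : Int)) ||
                 pvCan n fuel (mask ^^^ bm) (rem + (a : Int))

-- one 'for a in abs_iter:' pass of the candidate scan (break = findSome?)
def pvScan (n mask : Nat) (rem : Int) (sign : Int) (absIter : List Nat) : Option (Int × Nat) :=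
  absIter.findSome? fun a =>
    let bm := 1 <<< (a - 1)
    if mask &&& bm = 0 then none
    else
      let val := sign * (a : Int)
      if pvCan n n (mask ^^^ bm) (rem - val) then some (val, mask ^^^ bm) else none

-- the 'while mask_all:' greedy loop (fuel guard; fuel ≥ popcount mask on every call made)
def pvLoopA (n : Nat) : Nat → Nat → Int → List Int → List Int
  | fuel, mask, rem, res =>
    if mask = 0 then res
    else
      match fuel with
      | 0 => res  -- fuel guard, never reached by the program's calls
      | fuel + 1 =>
        match (pvScan n mask rem (-1) (List.range' 1 n).reverse).orElse
              (fun _ => pvScan n mask rem 1 (List.range' 1 n)) with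
        | none => []
        | some (val, mask') => pvLoopA n fuel mask' (rem - val) (res ++ [val])

def constructPermutation (n : Int) (target : Int) : List Int :=
  let total := PySem.Int.floordiv (n * (n + 1)) 2
  -- '(total - target) & 1' truthy ↔ band … 1 ≠ 0 (Python-exact on negatives via PySem.Int.band)
  if |target| > total ∨ PySem.Int.band (total - target) 1 ≠ 0 then []
  else
    -- past the early return the Python computes 1 << n, a ValueError for n < 0 (outside Pre_);
    -- for n ≥ 0, n.toNat = n exactly
    let nn := n.toNat
    pvLoopA nn nn ((1 <<< nn) - 1) target []

-- ===== PORT B =====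
-- _feasible(vals, r): exact ± reachability via an iterative subset-sum bitset
def pvFeasible (vals : List Int) (r : Int) : Bool :=
  let s := vals.sum
  if |r| > s ∨ PySem.Int.band (s - r) 1 ≠ 0 then false
  else
    let need := PySem.Int.floordiv (s - r) 2
    -- 'bits <<= a' / 'bits >> need': every element of vals and need are ≥ 0 on every call the
    -- program makes, so .toNat is exact here
    let bits := vals.foldl (fun b a => b ||| (b <<< a.toNat)) 1
    ((bits >>> need.toNat) &&& 1) == 1

-- the 'while remaining:' greedy loop of B (fuel guard; fuel ≥ len(remaining) on calls made)
def pvLoopB : Nat → List Int → Int → List Int → List Int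
  | 0, _, _, res => res  -- fuel guard, never reached by the program's calls
  | fuel + 1, remaining, rem, res =>
    if remaining.isEmpty then res
    else
      match (remaining.reverse.map (fun a => -a) ++ remaining).findSome? (fun val =>
          let a := |val|
          let rest := remaining.filter (fun x => x != a)
          if pvFeasible rest (rem - val) then some (val, rest) else none) with
      | none => []
      | some (val, rest) => pvLoopB fuel rest (rem - val) (res ++ [val])

def constructPermutation_alt (n : Int) (target : Int) : List Int :=
  let total := PySem.Int.floordiv (n * (n + 1)) 2
  if |target| > total ∨ PySem.Int.band (total - target) 1 ≠ 0 then []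
  else
    let remaining := PySem.List.pyRange 1 (n + 1) 1
    pvLoopB remaining.length remaining target []

-- ===== PRECONDITION & SPEC =====
-- Pre_ excludes exactly the inputs where A raises: n < 0 with the degenerate total passing the
-- early magnitude/parity check, where 'mask_all = (1 << n) - 1' raises ValueError.
def Pre_constructPermutation (n : Int) (target : Int) : Prop :=
  0 ≤ n ∨ |target| > PySem.Int.floordiv (n * (n + 1)) 2 ∨
    PySem.Int.band (PySem.Int.floordiv (n * (n + 1)) 2 - target) 1 ≠ 0
instance (n : Int) (target : Int) : Decidable (Pre_constructPermutation n target) := by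
  unfold Pre_constructPermutation; infer_instance
def pvWitness_constructPermutation : Int × Int := (4, 2)

def Spec_constructPermutation (n : Int) (target : Int) (out : List Int) : Prop := out = constructPermutation_alt n target
instance (n : Int) (target : Int) (out : List Int) : Decidable (Spec_constructPermutation n target out) := by unfold Spec_constructPermutation; infer_instance

-- ===== CLAIM (what is proved, stated in full; the proofs are below) =====
def Claim_equal_constructPermutation : Prop := ∀ (n : Int) (target : Int), Dom_constructPermutation n target → Pre_constructPermutation n target → Spec_constructPermutation n target (constructPermutation n target)


-- ===== LEMMAS AND PROOFS =====

-- the elements of 1..n whose bit is set in mask, ascending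
def pvMaskList (n mask : Nat) : List Nat :=
  (List.range' 1 n).filter (fun a => mask.testBit (a - 1))

-- signed reachability: some sub-multiset t of m is negated, the rest kept positive
def pvPM (m : Multiset Nat) (r : Int) : Prop :=
  ∃ t ≤ m, ((m.sum : Int) - 2 * (t.sum : Int) = r)

theorem pvPM_zero (r : Int) : pvPM 0 r ↔ r = 0 := by
  constructor
  · rintro ⟨t, ht, hs⟩
    simp [Multiset.le_zero.mp ht] at hs; omega
  · rintro rfl; exact ⟨0, le_rfl, by simp⟩

theorem pvPM_bound {m : Multiset Nat} {r : Int} (h : pvPM m r) : |r| ≤ (m.sum : Int) := by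
  obtain ⟨t, ht, hs⟩ := h
  have h1 : t.sum ≤ m.sum := by
    have hm : t + (m - t) = m := by rw [add_comm]; exact tsub_add_cancel_of_le ht
    calc t.sum ≤ t.sum + (m - t).sum := Nat.le_add_right _ _
      _ = m.sum := by rw [← Multiset.sum_add, hm]
  have h0 : (0 : Nat) ≤ t.sum := Nat.zero_le _
  rw [abs_le]; omega

theorem pvPM_parity {m : Multiset Nat} {r : Int} (h : pvPM m r) : 2 ∣ ((m.sum : Int) - r) := by
  obtain ⟨t, ht, hs⟩ := h
  exact ⟨t.sum, by omega⟩

theorem pvPM_decompose {m : Multiset Nat} {a : Nat} (ha : a ∈ m) (r : Int) :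
    pvPM m r ↔ pvPM (m.erase a) (r - a) ∨ pvPM (m.erase a) (r + a) := by
  have hsum : m.sum = a + (m.erase a).sum := (Multiset.sum_erase ha).symm
  constructor
  · rintro ⟨t, ht, hs⟩
    by_cases hat : a ∈ t
    · right
      refine ⟨t.erase a, Multiset.erase_le_erase a ht, ?_⟩
      have : t.sum = a + (t.erase a).sum := (Multiset.sum_erase hat).symm
      push_cast [hsum, this] at hs ⊢; omega
    · left
      refine ⟨t, ?_, ?_⟩
      · rw [Multiset.le_iff_count] at ht ⊢
        intro b
        rcases eq_or_ne b a with rfl | hb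
        · simp [Multiset.count_eq_zero_of_notMem hat]
        · rw [Multiset.count_erase_of_ne hb]; exact ht b
      · push_cast [hsum] at hs ⊢; omega
  · rintro (⟨t, ht, hs⟩ | ⟨t, ht, hs⟩)
    · exact ⟨t, le_trans ht (Multiset.erase_le a m), by push_cast [hsum] at hs ⊢; omega⟩
    · refine ⟨a ::ₘ t, ?_, ?_⟩
      · rw [← Multiset.cons_erase ha]
        exact Multiset.cons_le_cons a ht
      · rw [Multiset.sum_cons]
        push_cast [hsum] at hs ⊢; omega

theorem pvPM_exists {m : Multiset Nat} (hne : m ≠ 0) (r : Int) :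
    pvPM m r ↔ ∃ a ∈ m, (pvPM (m.erase a) (r - a) ∨ pvPM (m.erase a) (r + a)) := by
  constructor
  · intro h
    obtain ⟨a, ha⟩ := Multiset.exists_mem_of_ne_zero hne
    exact ⟨a, ha, (pvPM_decompose ha r).mp h⟩
  · rintro ⟨a, ha, h⟩
    exact (pvPM_decompose ha r).mpr h


theorem pv_and_shift (mask k : Nat) :
    (mask &&& (1 <<< k) = 0) ↔ mask.testBit k = false := by
  rw [Nat.one_shiftLeft, Nat.and_two_pow]
  rcases h : mask.testBit k <;> simp [h, (Nat.two_pow_pos k).ne']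

theorem pv_mem_maskList {n mask a : Nat} :
    a ∈ pvMaskList n mask ↔ (1 ≤ a ∧ a < 1 + n ∧ mask.testBit (a - 1) = true) := by
  simp only [pvMaskList, List.mem_filter, List.mem_range'_1]
  tauto

theorem pv_maskList_nodup (n mask : Nat) : (pvMaskList n mask).Nodup := by
  unfold pvMaskList
  exact List.Nodup.filter _ List.nodup_range'

theorem pv_maskList_zero (n : Nat) : pvMaskList n 0 = [] := by
  simp [pvMaskList, Nat.zero_testBit]

theorem pv_maskList_ne_nil {n mask : Nat} (h0 : mask ≠ 0) (h : mask < 2 ^ n) :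
    pvMaskList n mask ≠ [] := by
  have : ∃ i, mask.testBit i = true := by
    by_contra hc
    push Not at hc
    exact h0 (Nat.eq_of_testBit_eq (fun i => by simp [hc i, Nat.zero_testBit]))
  obtain ⟨i, hi⟩ := this
  have hin : i < n := by
    by_contra hni
    have : mask < 2 ^ i := lt_of_lt_of_le h (Nat.pow_le_pow_right (by norm_num) (by omega))
    simp [Nat.testBit_eq_false_of_lt this] at hi
  intro hnil
  have : (i + 1) ∈ pvMaskList n mask := pv_mem_maskList.mpr ⟨by omega, by omega, by simpa using hi⟩
  simp [hnil] at this

theorem pv_maskList_xor {n mask a : Nat} (h1 : 1 ≤ a) (hbit : mask.testBit (a - 1) = true) :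
    pvMaskList n (mask ^^^ (1 <<< (a - 1))) = (pvMaskList n mask).filter (fun x => x != a) := by
  unfold pvMaskList
  rw [List.filter_filter]
  apply List.filter_congr
  intro x hx
  have hx1 : 1 ≤ x := (List.mem_range'_1.mp hx).1
  rw [Nat.one_shiftLeft, Nat.testBit_xor, Nat.testBit_two_pow]
  rcases eq_or_ne x a with rfl | hxa
  · simp [hbit]
  · have hne : ¬(a - 1 = x - 1) := by omega
    simp [hne, hxa]

theorem pv_sum_map_add (b : Nat) (l : List Nat) :
    (l.map (fun i => b + i)).sum = l.length * b + l.sum := by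
  induction l with
  | nil => simp
  | cons x xs ih => simp [ih, Nat.succ_mul]; ring

theorem pv_maxAbs_eq : ∀ (k tmp bit acc : Nat), tmp < 2 ^ k →
    pvMaxAbs tmp bit acc =
      acc + (((List.range k).filter (tmp.testBit)).map (fun i => bit + i)).sum := by
  intro k
  induction k with
  | zero =>
    intro tmp bit acc h
    have : tmp = 0 := by omega
    subst this
    rw [pvMaxAbs]
    simp
  | succ k ih =>
    intro tmp bit acc h
    by_cases h0 : tmp = 0
    · subst h0
      rw [pvMaxAbs]
      have hnil : List.filter (Nat.testBit 0) (List.range (k + 1)) = [] :=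
        List.filter_eq_nil_iff.mpr (fun a _ => by simp [Nat.zero_testBit])
      simp [hnil]
    · rw [pvMaxAbs]
      simp only [h0, if_false, dif_neg, ne_eq, not_false_iff]
      rw [ih (tmp >>> 1) (bit + 1) _ (by rw [Nat.shiftRight_one]; omega)]
      rw [List.range_succ_eq_map, List.filter_cons, List.filter_map]
      have hfe : List.filter (tmp.testBit ∘ Nat.succ) (List.range k) =
          List.filter ((tmp >>> 1).testBit) (List.range k) :=
        List.filter_congr (fun x _ => by
          rw [Function.comp_apply, Nat.testBit_succ, Nat.shiftRight_one])
      rw [hfe]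
      have hand : (tmp &&& 1 = 1) ↔ tmp.testBit 0 = true := by
        rw [Nat.and_one_is_mod, Nat.testBit_zero]; simp
      have hm : List.map (fun i => bit + i)
            (List.map Nat.succ (List.filter ((tmp >>> 1).testBit) (List.range k))) =
          List.map (fun i => bit + 1 + i) (List.filter ((tmp >>> 1).testBit) (List.range k)) := by
        rw [List.map_map]
        apply List.map_congr_left
        intro x _
        simp only [Function.comp_apply]
        omega
      rcases hb : tmp.testBit 0
      · have hA : ¬(tmp % 2 = 1) := by
          rw [← Nat.and_one_is_mod, hand, hb]; simp
        simp [Nat.and_one_is_mod, hA, hb, hm, pv_sum_map_add]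
      · have hA : tmp % 2 = 1 := by rw [← Nat.and_one_is_mod]; exact hand.mpr hb
        simp [Nat.and_one_is_mod, hA, hb, hm, pv_sum_map_add]
        ring

theorem pv_maxAbs_sum {n mask : Nat} (h : mask < 2 ^ n) :
    pvMaxAbs mask 1 0 = (pvMaskList n mask).sum := by
  rw [pv_maxAbs_eq n mask 1 0 h]
  unfold pvMaskList
  rw [List.range'_eq_map_range, List.filter_map]
  have : (List.filter ((fun a => mask.testBit (a - 1)) ∘ fun x => 1 + x) (List.range n)) =
      (List.filter (mask.testBit) (List.range n)) := by
    apply List.filter_congr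
    intro x _
    simp [Function.comp]
  rw [this]
  simp


theorem pv_coe_erase_filter {l : List Nat} (hn : l.Nodup) (a : Nat) :
    ((l.filter (fun x => x != a) : List Nat) : Multiset Nat) = (↑l : Multiset Nat).erase a := by
  rw [Multiset.coe_erase, hn.erase_eq_filter]

theorem pv_can_iff (n : Nat) : ∀ (fuel mask : Nat) (rem : Int), mask < 2 ^ n →
    (pvMaskList n mask).length ≤ fuel →
    (pvCan n fuel mask rem = true ↔ pvPM (↑(pvMaskList n mask)) rem) := by
  intro fuel
  induction fuel with
  | zero =>
    intro mask rem hlt hlen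
    have hml : pvMaskList n mask = [] := List.eq_nil_of_length_eq_zero (Nat.le_zero.mp hlen)
    have h0 : mask = 0 := by
      by_contra h0
      exact pv_maskList_ne_nil h0 hlt hml
    subst h0
    rw [pvCan, if_pos rfl, hml]
    simp [pvPM_zero]
  | succ fuel ih =>
    intro mask rem hlt hlen
    rw [pvCan]
    by_cases h0 : mask = 0
    · subst h0
      rw [if_pos rfl, pv_maskList_zero]
      simp [pvPM_zero]
    · rw [if_neg h0]
      have hml := pv_maskList_ne_nil h0 hlt
      have hsum := pv_maxAbs_sum (n := n) hlt
      by_cases hbnd : rem < -(pvMaxAbs mask 1 0 : Int) ∨ rem > (pvMaxAbs mask 1 0 : Int)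
      · rw [if_pos hbnd]
        simp only [Bool.false_eq_true, false_iff]
        intro hPM
        have hb := pvPM_bound hPM
        rw [Multiset.sum_coe, abs_le, ← hsum] at hb
        omega
      · rw [if_neg hbnd]
        have hm0 : (↑(pvMaskList n mask) : Multiset Nat) ≠ 0 := by
          rw [ne_eq, Multiset.coe_eq_zero]
          exact hml
        rw [List.any_eq_true, pvPM_exists hm0 rem]
        constructor
        · rintro ⟨a, haR, hfa⟩
          simp only at hfa
          by_cases hb : mask &&& (1 <<< (a - 1)) = 0
          · rw [if_pos hb] at hfa
            exact absurd hfa (by simp)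
          · rw [if_neg hb] at hfa
            have hbit : mask.testBit (a - 1) = true := by
              rcases hx : mask.testBit (a - 1) with h1 | h2
              · exact absurd ((pv_and_shift mask (a - 1)).mpr hx) hb
              · rfl
            obtain ⟨ha1, han⟩ : 1 ≤ a ∧ a < 1 + n := by
              constructor
              · exact (List.mem_range'_1.mp haR).1
              · exact (List.mem_range'_1.mp haR).2
            have haL : a ∈ pvMaskList n mask := pv_mem_maskList.mpr ⟨ha1, han, hbit⟩
            have hxlt : mask ^^^ (1 <<< (a - 1)) < 2 ^ n := by
              refine Nat.xor_lt_two_pow hlt ?_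
              rw [Nat.one_shiftLeft]
              exact Nat.pow_lt_pow_right (by norm_num) (by omega)
            have hfl := pv_maskList_xor (n := n) ha1 hbit
            have hlen' : (pvMaskList n (mask ^^^ (1 <<< (a - 1)))).length ≤ fuel := by
              rw [hfl, ← (pv_maskList_nodup n mask).erase_eq_filter, List.length_erase_of_mem haL]
              have : 1 ≤ (pvMaskList n mask).length := by
                cases hL : pvMaskList n mask with
                | nil => exact absurd hL hml
                | cons x xs => simp
              omega
            have hcoe : (↑(pvMaskList n (mask ^^^ (1 <<< (a - 1)))) : Multiset Nat) =
                (↑(pvMaskList n mask) : Multiset Nat).erase a := by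
              rw [hfl, pv_coe_erase_filter (pv_maskList_nodup n mask)]
            rw [Bool.or_eq_true, ih _ _ hxlt hlen', ih _ _ hxlt hlen', hcoe] at hfa
            exact ⟨a, Multiset.mem_coe.mpr haL, hfa⟩
        · rintro ⟨a, haM, hor⟩
          have haL : a ∈ pvMaskList n mask := Multiset.mem_coe.mp haM
          obtain ⟨ha1, han, hbit⟩ := pv_mem_maskList.mp haL
          refine ⟨a, List.mem_range'_1.mpr ⟨ha1, han⟩, ?_⟩
          simp only
          have hb : ¬(mask &&& (1 <<< (a - 1)) = 0) := by
            rw [pv_and_shift, hbit]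
            simp
          rw [if_neg hb]
          have hxlt : mask ^^^ (1 <<< (a - 1)) < 2 ^ n := by
            refine Nat.xor_lt_two_pow hlt ?_
            rw [Nat.one_shiftLeft]
            exact Nat.pow_lt_pow_right (by norm_num) (by omega)
          have hfl := pv_maskList_xor (n := n) ha1 hbit
          have hlen' : (pvMaskList n (mask ^^^ (1 <<< (a - 1)))).length ≤ fuel := by
            rw [hfl, ← (pv_maskList_nodup n mask).erase_eq_filter, List.length_erase_of_mem haL]
            have : 1 ≤ (pvMaskList n mask).length := by
              cases hL : pvMaskList n mask with
              | nil => exact absurd hL hml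
              | cons x xs => simp
            omega
          have hcoe : (↑(pvMaskList n (mask ^^^ (1 <<< (a - 1)))) : Multiset Nat) =
              (↑(pvMaskList n mask) : Multiset Nat).erase a := by
            rw [hfl, pv_coe_erase_filter (pv_maskList_nodup n mask)]
          rw [Bool.or_eq_true, ih _ _ hxlt hlen', ih _ _ hxlt hlen', hcoe]
          exact hor

theorem pv_le_cons_iff {a : Nat} {m t : Multiset Nat} :
    t ≤ a ::ₘ m ↔ t ≤ m ∨ ∃ t', t = a ::ₘ t' ∧ t' ≤ m := by
  constructor
  · intro h
    by_cases ha : a ∈ t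
    · right
      refine ⟨t.erase a, (Multiset.cons_erase ha).symm, ?_⟩
      have := Multiset.erase_le_erase a h
      rwa [Multiset.erase_cons_head] at this
    · left
      exact (Multiset.le_cons_of_notMem ha).mp h
  · rintro (h | ⟨t', rfl, ht'⟩)
    · exact le_trans h (Multiset.le_cons_self _ _)
    · exact Multiset.cons_le_cons a ht'

theorem pv_bits_iff (l : List Nat) : ∀ (b k : Nat),
    ((l.foldl (fun b a => b ||| (b <<< a)) b).testBit k = true) ↔
      ∃ t ≤ (↑l : Multiset Nat), ∃ j, b.testBit j = true ∧ j + t.sum = k := by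
  induction l with
  | nil =>
    intro b k
    simp only [List.foldl_nil]
    constructor
    · intro h
      exact ⟨0, Multiset.zero_le _, k, h, by simp⟩
    · rintro ⟨t, ht, j, hj, hsum⟩
      have ht0 : t = 0 := Multiset.le_zero.mp (by simpa using ht)
      subst ht0
      simp only [Multiset.sum_zero, Nat.add_zero] at hsum
      subst hsum
      exact hj
  | cons a l ih =>
    intro b k
    simp only [List.foldl_cons]
    rw [ih]
    constructor
    · rintro ⟨t, ht, j, hj, hsum⟩
      rw [Nat.testBit_or, Bool.or_eq_true] at hj
      rcases hj with hj | hj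
      · refine ⟨t, ?_, j, hj, hsum⟩
        rw [← Multiset.cons_coe]
        exact le_trans ht (Multiset.le_cons_self _ _)
      · rw [Nat.testBit_shiftLeft, Bool.and_eq_true] at hj
        obtain ⟨haj, hj'⟩ := hj
        have haj' : a ≤ j := by simpa using haj
        refine ⟨a ::ₘ t, ?_, j - a, hj', ?_⟩
        · rw [← Multiset.cons_coe]
          exact Multiset.cons_le_cons a ht
        · rw [Multiset.sum_cons]
          omega
    · rintro ⟨t, ht, j, hj, hsum⟩
      rw [← Multiset.cons_coe] at ht
      rcases pv_le_cons_iff.mp ht with ht | ⟨t', rfl, ht'⟩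
      · refine ⟨t, ht, j, ?_, hsum⟩
        rw [Nat.testBit_or, hj]
        simp
      · rw [Multiset.sum_cons] at hsum
        refine ⟨t', ht', j + a, ?_, by omega⟩
        rw [Nat.testBit_or, Nat.testBit_shiftLeft]
        have h1 : j + a ≥ a := by omega
        have h2 : j + a - a = j := by omega
        simp [h1, h2, hj]

theorem pv_testBit_and (m k : Nat) : ((m >>> k) &&& 1 == 1) = m.testBit k := by
  have hmod : (m >>> k) &&& 1 = (m >>> k) % 2 := Nat.and_one_is_mod _
  rw [Nat.testBit, Nat.and_comm 1 (m >>> k), hmod]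
  have h2 : (m >>> k) % 2 = 0 ∨ (m >>> k) % 2 = 1 := by omega
  rcases h2 with h | h <;> rw [h] <;> rfl

theorem pv_testBit_one (j : Nat) : ((1 : Nat).testBit j = true) ↔ j = 0 := by
  have h : (1 : Nat) = 2 ^ 0 := rfl
  rw [h, Nat.testBit_two_pow]
  simp [eq_comm]

theorem pv_feasible_iff (l : List Nat) (r : Int) :
    (pvFeasible (l.map (Nat.cast : Nat → Int)) r = true) ↔ pvPM (↑l) r := by
  have hs : (l.map (Nat.cast : Nat → Int)).sum = (l.sum : Int) := (Nat.cast_list_sum l).symm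
  have hsum : (↑l : Multiset Nat).sum = l.sum := Multiset.sum_coe l
  unfold pvFeasible
  by_cases hc : |r| > (l.map (Nat.cast : Nat → Int)).sum ∨
      PySem.Int.band ((l.map (Nat.cast : Nat → Int)).sum - r) 1 ≠ 0
  · rw [if_pos hc]
    simp only [Bool.false_eq_true, false_iff]
    intro hPM
    rcases hc with hc | hc
    · have := pvPM_bound hPM
      rw [hsum] at this
      rw [hs] at hc
      omega
    · have hdvd := pvPM_parity hPM
      rw [hsum] at hdvd
      rw [hs, PySem.Int.band_one] at hc
      exact hc ((PySem.Int.mod_eq_zero_iff_dvd _ _).mpr hdvd)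
  · rw [if_neg hc]
    push Not at hc
    obtain ⟨hble, hband⟩ := hc
    rw [hs] at hble hband
    rw [PySem.Int.band_one] at hband
    have hdvd : (2 : Int) ∣ ((l.sum : Int) - r) := (PySem.Int.mod_eq_zero_iff_dvd _ _).mp hband
    obtain ⟨c, hcc⟩ := hdvd
    have hneed : PySem.Int.floordiv ((l.map (Nat.cast : Nat → Int)).sum - r) 2 = c := by
      rw [hs, hcc, PySem.Int.floordiv_eq_ediv_of_pos (by norm_num), Int.mul_ediv_cancel_left _ (by norm_num)]
    have hc0 : 0 ≤ c := by
      have h1 := (abs_le.mp hble).2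
      omega
    have hfold : (l.map (Nat.cast : Nat → Int)).foldl (fun b a => b ||| (b <<< a.toNat)) 1 =
        l.foldl (fun b a => b ||| (b <<< a)) 1 := by
      rw [List.foldl_map]
      simp
    simp only [hneed, hfold]
    rw [pv_testBit_and, pv_bits_iff]
    constructor
    · rintro ⟨t, ht, j, hj, hsum'⟩
      have hj0 : j = 0 := (pv_testBit_one _).mp hj
      subst hj0
      refine ⟨t, ht, ?_⟩
      rw [hsum]
      have hcast := Int.toNat_of_nonneg hc0
      omega
    · rintro ⟨t, ht, heq⟩
      rw [hsum] at heq
      refine ⟨t, ht, 0, (pv_testBit_one 0).mpr rfl, ?_⟩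
      have hcast := Int.toNat_of_nonneg hc0
      omega

theorem pv_findSome?_congr' {α β γ : Type} (g : α → Option β) (h : α → Option γ) (F : β → γ)
    (l : List α) (hp : ∀ a ∈ l, h a = (g a).map F) :
    l.findSome? h = (l.findSome? g).map F := by
  induction l with
  | nil => rfl
  | cons a l ih =>
    rw [List.findSome?_cons, List.findSome?_cons, hp a (by simp)]
    cases hg : g a with
    | none =>
      simp only [Option.map_none]
      exact ih (fun x hx => hp x (by simp [hx]))
    | some b => simp

theorem pv_scan_filter (n mask : Nat) (rem : Int) (sign : Int) (iter : List Nat) :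
    pvScan n mask rem sign iter =
      (iter.filter (fun a => mask.testBit (a - 1))).findSome? (fun a =>
        if pvCan n n (mask ^^^ (1 <<< (a - 1))) (rem - sign * (a : Int)) then
          some (sign * (a : Int), mask ^^^ (1 <<< (a - 1))) else none) := by
  unfold pvScan
  induction iter with
  | nil => rfl
  | cons a l ih =>
    rw [List.findSome?_cons, List.filter_cons]
    by_cases hb : mask &&& (1 <<< (a - 1)) = 0
    · have ht : mask.testBit (a - 1) = false := (pv_and_shift _ _).mp hb
      simp only [hb, if_pos, ht, Bool.false_eq_true, if_false]
      simpa using ih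
    · have ht : mask.testBit (a - 1) = true := by
        rcases h : mask.testBit (a - 1) with h1 | h2
        · exact absurd ((pv_and_shift _ _).mpr h) hb
        · rfl
      simp only [hb, if_neg, ht, if_true, not_false_iff]
      rw [List.findSome?_cons]
      by_cases hcan : pvCan n n (mask ^^^ (1 <<< (a - 1))) (rem - sign * (a : Int)) = true
      · simp only [hcan, if_pos]
      · simp only [hcan, if_neg, Bool.not_eq_true]
        simpa using ih

theorem pv_scan_some {n mask : Nat} {rem sign : Int} {iter : List Nat} {v : Int} {m' : Nat}
    (hiter : ∀ a ∈ iter, 1 ≤ a ∧ a < 1 + n)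
    (h : pvScan n mask rem sign iter = some (v, m')) :
    ∃ a, a ∈ pvMaskList n mask ∧ m' = mask ^^^ (1 <<< (a - 1)) := by
  unfold pvScan at h
  obtain ⟨a, ha, hfa⟩ := List.exists_of_findSome?_eq_some h
  simp only at hfa
  by_cases hb : mask &&& (1 <<< (a - 1)) = 0
  · rw [if_pos hb] at hfa
    exact absurd hfa (by simp)
  · rw [if_neg hb] at hfa
    have ht : mask.testBit (a - 1) = true := by
      rcases hx : mask.testBit (a - 1) with h1 | h2
      · exact absurd ((pv_and_shift _ _).mpr hx) hb
      · rfl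
    obtain ⟨ha1, han⟩ := hiter a ha
    refine ⟨a, pv_mem_maskList.mpr ⟨ha1, han, ht⟩, ?_⟩
    by_cases hcan : pvCan n n (mask ^^^ (1 <<< (a - 1))) (rem - sign * (a : Int)) = true
    · rw [if_pos hcan] at hfa
      exact (Prod.mk.injEq _ _ _ _ ▸ (Option.some.injEq _ _ ▸ hfa)).2.symm
    · rw [if_neg hcan] at hfa
      exact absurd hfa (by simp)

theorem pv_filter_map_cast (L : List Nat) (a : Nat) :
    (L.map (Nat.cast : Nat → Int)).filter (fun x => x != (a : Int)) =
      (L.filter (fun y => y != a)).map (Nat.cast : Nat → Int) := by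
  rw [List.filter_map]
  congr 1
  apply List.filter_congr
  intro y _
  rw [Bool.eq_iff_iff]
  simp

theorem pv_oracle_eq {n mask a : Nat} (hlt : mask < 2 ^ n) (haL : a ∈ pvMaskList n mask)
    (t : Int) :
    pvFeasible (((pvMaskList n mask).filter (fun y => y != a)).map (Nat.cast : Nat → Int)) t =
      pvCan n n (mask ^^^ (1 <<< (a - 1))) t := by
  obtain ⟨ha1, han, hbit⟩ := pv_mem_maskList.mp haL
  have hxlt : mask ^^^ (1 <<< (a - 1)) < 2 ^ n := by
    refine Nat.xor_lt_two_pow hlt ?_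
    rw [Nat.one_shiftLeft]
    exact Nat.pow_lt_pow_right (by norm_num) (by omega)
  have hfl := pv_maskList_xor (n := n) ha1 hbit
  have hlen : (pvMaskList n (mask ^^^ (1 <<< (a - 1)))).length ≤ n := by
    calc (pvMaskList n (mask ^^^ (1 <<< (a - 1)))).length
        ≤ (List.range' 1 n).length := List.length_filter_le _ _
      _ = n := List.length_range'
  rw [Bool.eq_iff_iff, pv_feasible_iff, pv_can_iff n n _ t hxlt hlen, hfl]

theorem pv_chosen_eq (n mask : Nat) (rem : Int) (hlt : mask < 2 ^ n) :
    ((((pvMaskList n mask).map (Nat.cast : Nat → Int)).reverse.map (fun a => -a) ++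
        (pvMaskList n mask).map (Nat.cast : Nat → Int)).findSome? (fun val =>
          if pvFeasible (((pvMaskList n mask).map (Nat.cast : Nat → Int)).filter
              (fun x => x != |val|)) (rem - val) then
            some (val, ((pvMaskList n mask).map (Nat.cast : Nat → Int)).filter
              (fun x => x != |val|))
          else none)) =
      ((pvScan n mask rem (-1) (List.range' 1 n).reverse).or
        (pvScan n mask rem 1 (List.range' 1 n))).map
        (fun p => (p.1, (pvMaskList n p.2).map (Nat.cast : Nat → Int))) := by
  rw [List.findSome?_append, Option.map_or]
  congr 1
  · -- negative pass
    rw [pv_scan_filter, List.filter_reverse]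
    have hML : (List.range' 1 n).filter (fun a => mask.testBit (a - 1)) = pvMaskList n mask := rfl
    rw [hML, ← List.map_reverse, List.map_map, List.findSome?_map]
    apply pv_findSome?_congr'
    intro a haRev
    have haL : a ∈ pvMaskList n mask := by simpa using List.mem_reverse.mp haRev
    simp only [Function.comp_apply]
    have habs : |(-(a : Int))| = (a : Int) := by
      rw [abs_neg, Nat.abs_cast]
    rw [habs, pv_filter_map_cast, pv_oracle_eq hlt haL]
    have hval : rem - -(a : Int) = rem - (-1) * (a : Int) := by ring
    rw [hval]
    by_cases hcan : pvCan n n (mask ^^^ (1 <<< (a - 1))) (rem - (-1) * (a : Int)) = true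
    · rw [if_pos hcan, if_pos hcan]
      simp only [Option.map_some]
      rw [pv_maskList_xor (pv_mem_maskList.mp haL).1 (pv_mem_maskList.mp haL).2.2]
      simp only [Option.some.injEq, Prod.mk.injEq]
      exact ⟨by ring, trivial⟩
    · rw [if_neg hcan, if_neg hcan]
      rfl
  · -- positive pass
    rw [pv_scan_filter]
    have hML : (List.range' 1 n).filter (fun a => mask.testBit (a - 1)) = pvMaskList n mask := rfl
    rw [hML, List.findSome?_map]
    apply pv_findSome?_congr'
    intro a haL
    simp only [Function.comp_apply]
    have habs : |((a : Nat) : Int)| = (a : Int) := Nat.abs_cast a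
    rw [habs, pv_filter_map_cast, pv_oracle_eq hlt haL]
    have hval : rem - (a : Int) = rem - 1 * (a : Int) := by ring
    rw [hval]
    by_cases hcan : pvCan n n (mask ^^^ (1 <<< (a - 1))) (rem - 1 * (a : Int)) = true
    · rw [if_pos hcan, if_pos hcan]
      simp only [Option.map_some]
      rw [pv_maskList_xor (pv_mem_maskList.mp haL).1 (pv_mem_maskList.mp haL).2.2]
      simp only [Option.some.injEq, Prod.mk.injEq]
      exact ⟨by ring, trivial⟩
    · rw [if_neg hcan, if_neg hcan]
      rfl

theorem pv_loop_eq (n : Nat) : ∀ (fuel mask : Nat) (rem : Int) (res : List Int),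
    mask < 2 ^ n → (pvMaskList n mask).length ≤ fuel →
    pvLoopA n fuel mask rem res =
      pvLoopB fuel ((pvMaskList n mask).map (Nat.cast : Nat → Int)) rem res := by
  intro fuel
  induction fuel with
  | zero =>
    intro mask rem res hlt hlen
    rw [pvLoopA, pvLoopB]
    split <;> rfl
  | succ fuel ih =>
    intro mask rem res hlt hlen
    rw [pvLoopA, pvLoopB]
    by_cases h0 : mask = 0
    · subst h0
      rw [if_pos rfl, pv_maskList_zero]
      simp
    · rw [if_neg h0]
      have hml := pv_maskList_ne_nil h0 hlt
      have hne : (((pvMaskList n mask).map (Nat.cast : Nat → Int)).isEmpty) = false := by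
        rcases hL : pvMaskList n mask with _ | ⟨x, xs⟩
        · exact absurd hL hml
        · rfl
      rw [hne]
      simp only [Bool.false_eq_true, if_false]
      rw [Option.orElse_eq_or]
      rw [pv_chosen_eq n mask rem hlt]
      cases hch : (pvScan n mask rem (-1) (List.range' 1 n).reverse).or
          (pvScan n mask rem 1 (List.range' 1 n)) with
      | none => rfl
      | some p =>
        obtain ⟨v, m'⟩ := p
        simp only [Option.map_some]
        have hex : ∃ a, a ∈ pvMaskList n mask ∧ m' = mask ^^^ (1 <<< (a - 1)) := by
          rcases Option.or_eq_some_iff.mp hch with h | ⟨_, h⟩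
          · exact pv_scan_some (fun a ha => by
              have := List.mem_reverse.mp ha
              exact ⟨(List.mem_range'_1.mp this).1, (List.mem_range'_1.mp this).2⟩) h
          · exact pv_scan_some (fun a ha =>
              ⟨(List.mem_range'_1.mp ha).1, (List.mem_range'_1.mp ha).2⟩) h
        obtain ⟨a, haL, rfl⟩ := hex
        obtain ⟨ha1, han, hbit⟩ := pv_mem_maskList.mp haL
        have hxlt : mask ^^^ (1 <<< (a - 1)) < 2 ^ n := by
          refine Nat.xor_lt_two_pow hlt ?_
          rw [Nat.one_shiftLeft]
          exact Nat.pow_lt_pow_right (by norm_num) (by omega)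
        have hlen' : (pvMaskList n (mask ^^^ (1 <<< (a - 1)))).length ≤ fuel := by
          rw [pv_maskList_xor ha1 hbit, ← (pv_maskList_nodup n mask).erase_eq_filter,
            List.length_erase_of_mem haL]
          have : 1 ≤ (pvMaskList n mask).length := by
            rcases hL : pvMaskList n mask with _ | ⟨x, xs⟩
            · exact absurd hL hml
            · simp
          omega
        exact ih _ (rem - v) (res ++ [v]) hxlt hlen'

-- ===== VERDICT (by name: the statement is the Claim_ definition above) =====
theorem constructPermutation_spec : Claim_equal_constructPermutation := by
  intro n target _ hPre
  unfold Spec_constructPermutation constructPermutation constructPermutation_alt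
  dsimp only
  by_cases hC : |target| > PySem.Int.floordiv (n * (n + 1)) 2 ∨
      PySem.Int.band (PySem.Int.floordiv (n * (n + 1)) 2 - target) 1 ≠ 0
  · rw [if_pos hC, if_pos hC]
  · rw [if_neg hC, if_neg hC]
    have hn : 0 ≤ n := by
      rcases hPre with h | h | h
      · exact h
      · exact absurd (Or.inl h) hC
      · exact absurd (Or.inr h) hC
    have hcast : ((n.toNat : Int)) = n := Int.toNat_of_nonneg hn
    have hrem : PySem.List.pyRange 1 (n + 1) 1 = (List.range' 1 n.toNat).map (Nat.cast : Nat → Int) := by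
      rw [PySem.List.pyRange_one]
      have h1 : ((n : Int) + 1 - 1).toNat = n.toNat := by omega
      rw [h1, List.range'_eq_map_range, List.map_map]
      apply List.map_congr_left
      intro k _
      simp only [Function.comp_apply]
      push_cast
      ring
    rw [hrem]
    have hlen : ((List.range' 1 n.toNat).map (Nat.cast : Nat → Int)).length = n.toNat := by
      simp [List.length_range']
    rw [hlen]
    have hmaskall : pvMaskList n.toNat ((1 <<< n.toNat) - 1) = List.range' 1 n.toNat := by
      unfold pvMaskList
      apply List.filter_eq_self.mpr
      intro a ha
      rw [Nat.one_shiftLeft, Nat.testBit_two_pow_sub_one]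
      have hb := List.mem_range'_1.mp ha
      simp only [decide_eq_true_eq]
      omega
    have hlt : (1 <<< n.toNat) - 1 < 2 ^ n.toNat := by
      rw [Nat.one_shiftLeft]
      have := Nat.two_pow_pos n.toNat
      omega
    have hlenml : (pvMaskList n.toNat ((1 <<< n.toNat) - 1)).length ≤ n.toNat := by
      rw [hmaskall]
      simp [List.length_range']
    rw [pv_loop_eq n.toNat n.toNat _ target [] hlt hlenml, hmaskall]
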